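-- pv_equiv track=rewrite | github.com/SVCE-ACM/A-December-Of-Algorithms-2023 | December 16/python3_HariVignesh18_OutbreakDynamics.py | min_infection_time
-- ===== SOURCE A (Python) =====
-- from collections import deque
--
-- def min_infection_time(grid):
--     rows, cols = len(grid), len(grid[0])
--     humans = 0
--     zombies = deque()
--     for i in range(rows):
--         for j in range(cols):
--             if grid[i][j] == 1:
--                 zombies.append((i, j))
--             elif grid[i][j] == 0:
--                 humans += 1
--     time = 0
--     directions = [(0, 1), (0, -1), (1, 0), (-1, 0)]
--     while humans > 0 and zombies:
--         time += 1
--         for _ in range(len(zombies)):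
--             x, y = zombies.popleft()
--             for dx, dy in directions:
--                 nx, ny = x + dx, y + dy
--                 if 0 <= nx < rows and 0 <= ny < cols:
--                     if grid[nx][ny] == 0:
--                         humans -= 1
--                         grid[nx][ny] = 1
--                         zombies.append((nx, ny))
--
--     return time if humans == 0 else -1
-- ===== SOURCE B (Python) =====
-- def min_infection_time(grid):
--     # Round-based grid simulation: no queue/deque; each round flips every human
--     # cell adjacent to a zombie cell, until no flip happens. Mutates grid like A.
--     rows, cols = len(grid), len(grid[0])
--     time = 0
--     while True:
--         targets = [(i, j) for i in range(rows) for j in range(cols)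
--                    if grid[i][j] == 0 and any(
--                        0 <= i + di < rows and 0 <= j + dj < cols
--                        and grid[i + di][j + dj] == 1
--                        for di, dj in ((0, 1), (0, -1), (1, 0), (-1, 0)))]
--         if not targets:
--             break
--         for i, j in targets:
--             grid[i][j] = 1
--         time += 1
--     if any(grid[i][j] == 0 for i in range(rows) for j in range(cols)):
--         return -1
--     return time
-- ===== Notes on version B (the rewrite author's own statement) =====
-- stated objective: alternative
-- what changed: Replaces the deque-based level-synchronous BFS with a queue-free round simulation: each round scans the whole grid, flips every human cell adjacent to a zombie cell simultaneously, and stops when a round flips nothing; both mutate the grid identically.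
import Mathlib
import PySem

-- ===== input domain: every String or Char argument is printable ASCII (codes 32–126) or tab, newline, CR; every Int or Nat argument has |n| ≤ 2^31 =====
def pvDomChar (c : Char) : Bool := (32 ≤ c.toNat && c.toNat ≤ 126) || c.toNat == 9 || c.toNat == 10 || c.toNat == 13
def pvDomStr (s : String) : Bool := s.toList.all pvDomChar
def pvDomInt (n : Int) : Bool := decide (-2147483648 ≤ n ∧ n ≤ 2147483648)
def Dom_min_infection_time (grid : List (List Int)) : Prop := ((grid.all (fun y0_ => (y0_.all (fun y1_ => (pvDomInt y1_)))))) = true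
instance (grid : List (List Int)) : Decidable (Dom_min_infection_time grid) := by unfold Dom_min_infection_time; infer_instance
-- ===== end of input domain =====

-- B replaces A's deque-based level BFS by a queue-free round simulation of the whole
-- grid; in Python both mutate `grid` identically, the theorems here are about the
-- returned value.

-- ===== PORT A =====
-- shared tiny grid accessors (defaults are unreachable on inputs admitted by Pre_)
def cellAt (g : List (List Int)) (i j : Nat) : Int := (g.getD i []).getD j 2

def setCell (g : List (List Int)) (i j : Nat) (v : Int) : List (List Int) :=
  g.set i ((g.getD i []).set j v)

def pvDirs : List (Int × Int) := [(0,1),(0,-1),(1,0),(-1,0)]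

-- the initial double scan: humans count and the zombie deque, in row-major order
def scanA (g : List (List Int)) (rows cols : Nat) : Int × List (Nat × Nat) :=
  (List.range rows).foldl (fun st i =>
    (List.range cols).foldl (fun st j =>
      if cellAt g i j = 1 then (st.1, st.2 ++ [(i, j)])
      else if cellAt g i j = 0 then (st.1 + 1, st.2) else st) st) (0, [])

-- body of `for dx, dy in directions`
def dirStep (rows cols x y : Nat)
    (st : List (List Int) × Int × List (Nat × Nat)) (d : Int × Int) :
    List (List Int) × Int × List (Nat × Nat) :=
  let nx : Int := (x : Int) + d.1
  let ny : Int := (y : Int) + d.2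
  if 0 ≤ nx ∧ nx < (rows : Int) ∧ 0 ≤ ny ∧ ny < (cols : Int) then
    if cellAt st.1 nx.toNat ny.toNat = 0 then
      (setCell st.1 nx.toNat ny.toNat 1, st.2.1 - 1, st.2.2 ++ [(nx.toNat, ny.toNat)])
    else st
  else st

def stepCellA (rows cols : Nat) (st : List (List Int) × Int × List (Nat × Nat))
    (x y : Nat) : List (List Int) × Int × List (Nat × Nat) :=
  pvDirs.foldl (dirStep rows cols x y) st

-- `for _ in range(len(zombies))`: pop n items off the front, appending new zombies
def levelA (rows cols : Nat) :
    Nat → List (List Int) × Int × List (Nat × Nat) → List (List Int) × Int × List (Nat × Nat)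
  | 0, st => st
  | n + 1, (g, h, q) =>
    match q with
    | [] => (g, h, [])
    | c :: rest => levelA rows cols n (stepCellA rows cols (g, h, rest) c.1 c.2)

-- `while humans > 0 and zombies`; the fuel passed at the call site always suffices
-- on inputs admitted by Pre_ (each level strictly decreases humans + len(queue))
def whileA (rows cols : Nat) :
    Nat → List (List Int) × Int × List (Nat × Nat) → Int → Int
  | 0, st, t => if st.2.1 = 0 then t else -1
  | f + 1, (g, h, q), t =>
    if 0 < h ∧ q ≠ [] then
      whileA rows cols f (levelA rows cols q.length (g, h, q)) (t + 1)
    else if h = 0 then t else -1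

def min_infection_time (grid : List (List Int)) : Int :=
  let rows := grid.length
  let cols := (grid.getD 0 []).length
  let s := scanA grid rows cols
  whileA rows cols (s.1.toNat + s.2.length + 1) (grid, s.1, s.2) 0

-- ===== PORT B =====
def isTarget (g : List (List Int)) (rows cols i j : Nat) : Bool :=
  decide (cellAt g i j = 0) &&
  pvDirs.any (fun d =>
    let ni : Int := (i : Int) + d.1
    let nj : Int := (j : Int) + d.2
    decide (0 ≤ ni ∧ ni < (rows : Int) ∧ 0 ≤ nj ∧ nj < (cols : Int)) &&
    decide (cellAt g ni.toNat nj.toNat = 1))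

-- the round's comprehension, in row-major order
def targetsB (g : List (List Int)) (rows cols : Nat) : List (Nat × Nat) :=
  (List.range rows).flatMap (fun i =>
    ((List.range cols).filter (fun j => isTarget g rows cols i j)).map (fun j => (i, j)))

def flipB (g : List (List Int)) (ts : List (Nat × Nat)) : List (List Int) :=
  ts.foldl (fun g c => setCell g c.1 c.2 1) g

-- `while True`; the fuel passed at the call site always suffices (every round that
-- does not break flips at least one 0-cell of the rows*cols window)
def whileB (rows cols : Nat) : Nat → List (List Int) → Int → List (List Int) × Int
  | 0, g, t => (g, t)
  | f + 1, g, t =>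
    let ts := targetsB g rows cols
    if ts = [] then (g, t) else whileB rows cols f (flipB g ts) (t + 1)

def anyZeroB (g : List (List Int)) (rows cols : Nat) : Bool :=
  (List.range rows).any (fun i => (List.range cols).any (fun j => cellAt g i j == 0))

def min_infection_time_alt (grid : List (List Int)) : Int :=
  let rows := grid.length
  let cols := (grid.getD 0 []).length
  let r := whileB rows cols (rows * cols + 1) grid 0
  if anyZeroB r.1 rows cols then -1 else r.2

-- ===== PRECONDITION & SPEC =====
-- Pre_ excludes exactly the inputs on which the Python A raises an IndexError:
-- the empty grid (grid[0]) and ragged grids with some row shorter than row 0.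
def Pre_min_infection_time (grid : List (List Int)) : Prop :=
  grid ≠ [] ∧ ∀ row ∈ grid, (grid.getD 0 []).length ≤ row.length
instance (grid : List (List Int)) : Decidable (Pre_min_infection_time grid) := by
  unfold Pre_min_infection_time; infer_instance

def pvWitness_min_infection_time : List (List Int) := [[1, 0], [0, 0]]

def Spec_min_infection_time (grid : List (List Int)) (out : Int) : Prop :=
  out = min_infection_time_alt grid
instance (grid : List (List Int)) (out : Int) : Decidable (Spec_min_infection_time grid out) := by
  unfold Spec_min_infection_time; infer_instance

-- ===== CLAIM (what is proved, stated in full; the proofs are below) =====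
def Claim_equal_min_infection_time : Prop :=
  ∀ (grid : List (List Int)), Dom_min_infection_time grid →
    Pre_min_infection_time grid → Spec_min_infection_time grid (min_infection_time grid)

-- ===== LEMMAS AND PROOFS =====

-- shape bookkeeping
def RowsOk (g : List (List Int)) (rows cols : Nat) : Prop :=
  g.length = rows ∧ ∀ i : Nat, i < rows → cols ≤ (g.getD i []).length

def SameShape (g₁ g₂ : List (List Int)) : Prop :=
  g₁.length = g₂.length ∧ ∀ i : Nat, (g₁.getD i []).length = (g₂.getD i []).length

-- window zero cells, as a finset
def Zf (g : List (List Int)) (rows cols : Nat) : Finset (Nat × Nat) :=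
  (Finset.range rows ×ˢ Finset.range cols).filter (fun p => cellAt g p.1 p.2 = 0)

-- 4-adjacency on Nat coordinates
def AdjN (a b : Nat × Nat) : Prop :=
  (a.1 = b.1 ∧ (a.2 + 1 = b.2 ∨ b.2 + 1 = a.2)) ∨
  (a.2 = b.2 ∧ (a.1 + 1 = b.1 ∨ b.1 + 1 = a.1))

-- A's queue invariant: every window 1-cell outside the queue has no window 0-neighbour
def Sat (g : List (List Int)) (rows cols : Nat) (Q : List (Nat × Nat)) : Prop :=
  ∀ i j, i < rows → j < cols → cellAt g i j = 1 → (i, j) ∉ Q →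
    ∀ a b, AdjN (i, j) (a, b) → a < rows → b < cols → cellAt g a b ≠ 0


-- ---- basic grid lemmas ----

theorem getD_getD (l : List (List Int)) (n : Nat) :
    l.getD n [] = l[n]?.getD [] := List.getD_eq_getElem?_getD

theorem cellAt_setCell (g : List (List Int)) (i j : Nat) (v : Int)
    (hi : i < g.length) (hj : j < (g.getD i []).length) (a b : Nat) :
    cellAt (setCell g i j v) a b = if a = i ∧ b = j then v else cellAt g a b := by
  unfold cellAt setCell
  rw [getD_getD (g.set i ((g.getD i []).set j v)) a, List.getElem?_set]
  by_cases hai : i = a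
  · subst hai
    rw [if_pos rfl, if_pos hi]
    simp only [Option.getD_some]
    by_cases hbj : b = j
    · subst hbj
      rw [List.getD_eq_getElem?_getD, List.getElem?_set, if_pos rfl, if_pos hj,
        if_pos (⟨trivial, rfl⟩ : True ∧ b = b)]
      rfl
    · rw [List.getD_eq_getElem?_getD, List.getElem?_set, if_neg (fun h => hbj h.symm),
        if_neg (fun h : True ∧ b = j => hbj h.2), ← List.getD_eq_getElem?_getD]
  · rw [if_neg hai, if_neg (fun h => hai h.1.symm), ← getD_getD]

theorem sameShape_setCell (g : List (List Int)) (i j : Nat) (v : Int) :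
    SameShape (setCell g i j v) g := by
  constructor
  · simp [setCell]
  · intro a
    unfold setCell
    rw [getD_getD (g.set i ((g.getD i []).set j v)) a, List.getElem?_set]
    by_cases hai : i = a
    · subst hai
      by_cases hi : i < g.length
      · simp [hi]
      · rw [if_pos rfl, if_neg hi, getD_getD, List.getElem?_eq_none (by omega)]
    · rw [if_neg hai, ← getD_getD]

theorem sameShape_refl (g : List (List Int)) : SameShape g g := ⟨rfl, fun _ => rfl⟩

theorem sameShape_trans {g₁ g₂ g₃ : List (List Int)} (h₁ : SameShape g₁ g₂)
    (h₂ : SameShape g₂ g₃) : SameShape g₁ g₃ :=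
  ⟨h₁.1.trans h₂.1, fun i => (h₁.2 i).trans (h₂.2 i)⟩

theorem rowsOk_of_sameShape {g g' : List (List Int)} {rows cols : Nat}
    (hs : SameShape g' g) (hR : RowsOk g rows cols) : RowsOk g' rows cols :=
  ⟨hs.1.trans hR.1, fun i hi => (hs.2 i) ▸ hR.2 i hi⟩

theorem rowLen_ge {g : List (List Int)} {rows cols : Nat} (hR : RowsOk g rows cols)
    {i j : Nat} (hi : i < rows) (hj : j < cols) :
    i < g.length ∧ j < (g.getD i []).length := by
  exact ⟨hR.1 ▸ hi, lt_of_lt_of_le hj (hR.2 i hi)⟩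

-- flipping a window 0-cell removes exactly it from the zero set
theorem Zf_flip {g : List (List Int)} {rows cols i j : Nat}
    (hR : RowsOk g rows cols) (hi : i < rows) (hj : j < cols)
    (_h0 : cellAt g i j = 0) :
    Zf (setCell g i j 1) rows cols = (Zf g rows cols).erase (i, j) := by
  obtain ⟨hgi, hgj⟩ := rowLen_ge hR hi hj
  ext p
  simp only [Zf, Finset.mem_erase, Finset.mem_filter, Finset.mem_product, Finset.mem_range,
    cellAt_setCell g i j 1 hgi hgj]
  constructor
  · rintro ⟨hw, hc⟩
    by_cases hp : p.1 = i ∧ p.2 = j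
    · rw [if_pos hp] at hc; exact absurd hc (by norm_num)
    · rw [if_neg hp] at hc
      refine ⟨fun he => hp ⟨by rw [he], by rw [he]⟩, hw, hc⟩
  · rintro ⟨hne, hw, hc⟩
    refine ⟨hw, ?_⟩
    rw [if_neg (fun hp => hne (Prod.ext hp.1 hp.2))]
    exact hc

theorem Zf_flip_card {g : List (List Int)} {rows cols i j : Nat}
    (hR : RowsOk g rows cols) (hi : i < rows) (hj : j < cols)
    (h0 : cellAt g i j = 0) :
    (Zf (setCell g i j 1) rows cols).card + 1 = (Zf g rows cols).card := by
  have hm : (i, j) ∈ Zf g rows cols := by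
    simp [Zf, Finset.mem_filter, Finset.mem_product, Finset.mem_range, hi, hj, h0]
  rw [Zf_flip hR hi hj h0, Finset.card_erase_of_mem hm]
  have := Finset.card_pos.mpr ⟨(i, j), hm⟩
  omega


-- ---- adjacency bridges ----

theorem AdjN_of_dir {d : Int × Int} (hd : d ∈ pvDirs) (x y a b : Nat)
    (h1 : (x : Int) + d.1 = a) (h2 : (y : Int) + d.2 = b) : AdjN (x, y) (a, b) := by
  simp only [pvDirs, List.mem_cons, List.not_mem_nil, or_false] at hd
  unfold AdjN
  rcases hd with h | h | h | h <;> subst h <;> simp_all <;> omega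

theorem dir_of_AdjN {x y a b : Nat} (h : AdjN (x, y) (a, b)) :
    ∃ d ∈ pvDirs, (x : Int) + d.1 = a ∧ (y : Int) + d.2 = b := by
  unfold AdjN at h
  simp only [pvDirs, List.mem_cons, List.not_mem_nil, or_false]
  rcases h with ⟨h1, h2 | h2⟩ | ⟨h1, h2 | h2⟩
  · exact ⟨(0, 1), by simp, by omega, by omega⟩
  · exact ⟨(0, -1), by simp, by omega, by omega⟩
  · exact ⟨(1, 0), by simp, by omega, by omega⟩
  · exact ⟨(-1, 0), by simp, by omega, by omega⟩

theorem AdjN_symm {p q : Nat × Nat} (h : AdjN p q) : AdjN q p := by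
  unfold AdjN at h ⊢; omega

-- ---- the directions fold ----

theorem dirStep_append (rows cols x y : Nat) (g : List (List Int)) (h : Int)
    (S : List (Nat × Nat)) (d : Int × Int) :
    dirStep rows cols x y (g, h, S) d =
      ((dirStep rows cols x y (g, h, []) d).1, (dirStep rows cols x y (g, h, []) d).2.1,
        S ++ (dirStep rows cols x y (g, h, []) d).2.2) := by
  unfold dirStep
  dsimp only
  split_ifs <;> simp_all

theorem foldDirs_append (rows cols x y : Nat) :
    ∀ (ds : List (Int × Int)) (g : List (List Int)) (h : Int) (S : List (Nat × Nat)),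
    ds.foldl (dirStep rows cols x y) (g, h, S) =
      ((ds.foldl (dirStep rows cols x y) (g, h, [])).1,
       (ds.foldl (dirStep rows cols x y) (g, h, [])).2.1,
       S ++ (ds.foldl (dirStep rows cols x y) (g, h, [])).2.2) := by
  intro ds
  induction ds with
  | nil => intro g h S; simp
  | cons d ds ih =>
    intro g h S
    simp only [List.foldl_cons]
    rw [dirStep_append rows cols x y g h S d]
    obtain ⟨g', h', E, hd⟩ : ∃ g' h' E, dirStep rows cols x y (g, h, []) d = (g', h', E) :=
      ⟨_, _, _, rfl⟩
    rw [hd, ih g' h' (S ++ E), ih g' h' E]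
    simp


theorem foldDirs_spec (rows cols x y : Nat) :
    ∀ (ds : List (Int × Int)) (g : List (List Int)) (h : Int) (S : List (Nat × Nat)),
    RowsOk g rows cols → h = ((Zf g rows cols).card : Int) →
    ∃ g₁ E,
      ds.foldl (dirStep rows cols x y) (g, h, S) = (g₁, h - E.length, S ++ E) ∧
      SameShape g₁ g ∧
      h - E.length = ((Zf g₁ rows cols).card : Int) ∧
      (∀ p ∈ E, p.1 < rows ∧ p.2 < cols ∧ cellAt g p.1 p.2 = 0 ∧
          ∃ d ∈ ds, (x : Int) + d.1 = p.1 ∧ (y : Int) + d.2 = p.2) ∧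
      (∀ i j : Nat, cellAt g₁ i j = if (i, j) ∈ E then 1 else cellAt g i j) ∧
      (∀ d ∈ ds, ∀ a b : Nat, (x : Int) + d.1 = a → (y : Int) + d.2 = b →
          a < rows → b < cols → cellAt g₁ a b ≠ 0) := by
  intro ds
  induction ds with
  | nil =>
    intro g h S hR hZ
    exact ⟨g, [], by simp, sameShape_refl g, by simpa using hZ, by simp, by simp, by simp⟩
  | cons d ds ih =>
    intro g h S hR hZ
    simp only [List.foldl_cons]
    by_cases hg : 0 ≤ (x : Int) + d.1 ∧ (x : Int) + d.1 < (rows : Int) ∧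
        0 ≤ (y : Int) + d.2 ∧ (y : Int) + d.2 < (cols : Int)
    · by_cases hc : cellAt g ((x : Int) + d.1).toNat ((y : Int) + d.2).toNat = 0
      · have hstep : dirStep rows cols x y (g, h, S) d =
            (setCell g ((x : Int) + d.1).toNat ((y : Int) + d.2).toNat 1, h - 1,
              S ++ [(((x : Int) + d.1).toNat, ((y : Int) + d.2).toNat)]) := by
          unfold dirStep; dsimp only; rw [if_pos hg, if_pos hc]
        rw [hstep]
        have hpi : ((x : Int) + d.1).toNat < rows := by omega
        have hpj : ((y : Int) + d.2).toNat < cols := by omega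
        obtain ⟨hgi, hgj⟩ := rowLen_ge hR hpi hpj
        have hflip := Zf_flip_card (g := g) hR hpi hpj hc
        have hR' : RowsOk (setCell g ((x : Int) + d.1).toNat ((y : Int) + d.2).toNat 1) rows cols :=
          rowsOk_of_sameShape (sameShape_setCell g _ _ 1) hR
        have hZ' : h - 1 =
            ((Zf (setCell g ((x : Int) + d.1).toNat ((y : Int) + d.2).toNat 1) rows cols).card : Int) := by
          omega
        obtain ⟨g₁, E₂, hfold, hshape, hZ₁, hEprop, hchar, hcov⟩ :=
          ih (setCell g ((x : Int) + d.1).toNat ((y : Int) + d.2).toNat 1) (h - 1)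
            (S ++ [(((x : Int) + d.1).toNat, ((y : Int) + d.2).toNat)]) hR' hZ'
        have hsetchar := cellAt_setCell g ((x : Int) + d.1).toNat ((y : Int) + d.2).toNat 1 hgi hgj
        refine ⟨g₁, (((x : Int) + d.1).toNat, ((y : Int) + d.2).toNat) :: E₂, ?_,
          sameShape_trans hshape (sameShape_setCell g _ _ 1),
          by simp only [List.length_cons]; push_cast at hZ₁ ⊢; omega,
          ?_, ?_, ?_⟩
        · rw [hfold]
          simp only [Prod.mk.injEq, List.length_cons]
          refine ⟨by trivial, by push_cast; ring, by simp⟩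
        · intro q hq
          rcases List.mem_cons.mp hq with hq | hq
          · subst hq
            exact ⟨hpi, hpj, hc, ⟨d, List.mem_cons_self, by omega, by omega⟩⟩
          · obtain ⟨hq1, hq2, hq0, d', hd', he1, he2⟩ := hEprop q hq
            rw [hsetchar q.1 q.2] at hq0
            by_cases hqp : q.1 = ((x : Int) + d.1).toNat ∧ q.2 = ((y : Int) + d.2).toNat
            · rw [if_pos hqp] at hq0; exact absurd hq0 (by norm_num)
            · rw [if_neg hqp] at hq0
              exact ⟨hq1, hq2, hq0, d', List.mem_cons_of_mem d hd', he1, he2⟩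
        · intro i j
          rw [hchar i j, hsetchar i j]
          by_cases h2 : (i, j) ∈ E₂
          · rw [if_pos h2, if_pos (List.mem_cons_of_mem _ h2)]
          · rw [if_neg h2]
            by_cases hp : i = ((x : Int) + d.1).toNat ∧ j = ((y : Int) + d.2).toNat
            · rw [if_pos hp, if_pos (by simp [hp.1, hp.2])]
            · rw [if_neg hp, if_neg ?_]
              intro hmem
              rcases List.mem_cons.mp hmem with hm | hm
              · exact hp ⟨congrArg Prod.fst hm, congrArg Prod.snd hm⟩
              · exact h2 hm
        · intro d' hd' a b ha1 ha2 ha hb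
          rcases List.mem_cons.mp hd' with hd' | hd'
          · subst hd'
            have hab : a = ((x : Int) + d'.1).toNat ∧ b = ((y : Int) + d'.2).toNat := by omega
            rw [hchar a b]
            by_cases hm : (a, b) ∈ E₂
            · rw [if_pos hm]; norm_num
            · rw [if_neg hm, hsetchar a b, if_pos hab]; norm_num
          · exact hcov d' hd' a b ha1 ha2 ha hb
      · have hstep : dirStep rows cols x y (g, h, S) d = (g, h, S) := by
          unfold dirStep; dsimp only; rw [if_pos hg, if_neg hc]
        rw [hstep]
        obtain ⟨g₁, E, hfold, hshape, hZ₁, hEprop, hchar, hcov⟩ := ih g h S hR hZ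
        refine ⟨g₁, E, hfold, hshape, hZ₁, ?_, hchar, ?_⟩
        · intro q hq
          obtain ⟨hq1, hq2, hq0, d', hd', he⟩ := hEprop q hq
          exact ⟨hq1, hq2, hq0, d', List.mem_cons_of_mem d hd', he⟩
        · intro d' hd' a b ha1 ha2 ha hb
          rcases List.mem_cons.mp hd' with hd' | hd'
          · subst hd'
            have hab : a = ((x : Int) + d'.1).toNat ∧ b = ((y : Int) + d'.2).toNat := by omega
            rw [hchar a b]
            by_cases hm : (a, b) ∈ E
            · rw [if_pos hm]; norm_num
            · rw [if_neg hm, hab.1, hab.2]; exact hc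
          · exact hcov d' hd' a b ha1 ha2 ha hb
    · have hstep : dirStep rows cols x y (g, h, S) d = (g, h, S) := by
        unfold dirStep; dsimp only; rw [if_neg hg]
      rw [hstep]
      obtain ⟨g₁, E, hfold, hshape, hZ₁, hEprop, hchar, hcov⟩ := ih g h S hR hZ
      refine ⟨g₁, E, hfold, hshape, hZ₁, ?_, hchar, ?_⟩
      · intro q hq
        obtain ⟨hq1, hq2, hq0, d', hd', he⟩ := hEprop q hq
        exact ⟨hq1, hq2, hq0, d', List.mem_cons_of_mem d hd', he⟩
      · intro d' hd' a b ha1 ha2 ha hb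
        rcases List.mem_cons.mp hd' with hd' | hd'
        · subst hd'
          exact absurd (by omega : 0 ≤ (x : Int) + d'.1 ∧ (x : Int) + d'.1 < (rows : Int) ∧
            0 ≤ (y : Int) + d'.2 ∧ (y : Int) + d'.2 < (cols : Int)) hg
        · exact hcov d' hd' a b ha1 ha2 ha hb


theorem levelA_eq_foldl (rows cols : Nat) :
    ∀ (Q : List (Nat × Nat)) (g : List (List Int)) (h : Int) (App : List (Nat × Nat)),
    levelA rows cols Q.length (g, h, Q ++ App) =
      Q.foldl (fun st c => stepCellA rows cols st c.1 c.2) (g, h, App) := by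
  intro Q
  induction Q with
  | nil => intro g h App; rfl
  | cons c Q' ih =>
    intro g h App
    simp only [List.length_cons, List.cons_append, List.foldl_cons]
    show levelA rows cols Q'.length (stepCellA rows cols (g, h, Q' ++ App) c.1 c.2) =
      Q'.foldl (fun st c => stepCellA rows cols st c.1 c.2) (stepCellA rows cols (g, h, App) c.1 c.2)
    simp only [stepCellA]
    rw [foldDirs_append rows cols c.1 c.2 pvDirs g h (Q' ++ App),
      foldDirs_append rows cols c.1 c.2 pvDirs g h App, List.append_assoc]
    exact ih _ _ _

theorem foldQ_spec (rows cols : Nat) :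
    ∀ (Q : List (Nat × Nat)) (g : List (List Int)) (h : Int) (S : List (Nat × Nat)),
    RowsOk g rows cols → h = ((Zf g rows cols).card : Int) →
    (∀ p ∈ Q, p.1 < rows ∧ p.2 < cols ∧ cellAt g p.1 p.2 = 1) →
    ∃ g₁ E,
      Q.foldl (fun st c => stepCellA rows cols st c.1 c.2) (g, h, S) = (g₁, h - E.length, S ++ E) ∧
      SameShape g₁ g ∧
      h - E.length = ((Zf g₁ rows cols).card : Int) ∧
      (∀ p ∈ E, p.1 < rows ∧ p.2 < cols ∧ cellAt g p.1 p.2 = 0 ∧ ∃ c ∈ Q, AdjN c p) ∧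
      (∀ i j : Nat, cellAt g₁ i j = if (i, j) ∈ E then 1 else cellAt g i j) ∧
      (∀ c ∈ Q, ∀ a b : Nat, AdjN c (a, b) → a < rows → b < cols → cellAt g₁ a b ≠ 0) := by
  intro Q
  induction Q with
  | nil =>
    intro g h S hR hZ _
    exact ⟨g, [], by simp, sameShape_refl g, by simpa using hZ, by simp, by simp, by simp⟩
  | cons c Q' ih =>
    intro g h S hR hZ hQ
    simp only [List.foldl_cons]
    obtain ⟨g', E₁, hfold1, hsh1, hZ1, hE1, hchar1, hcov1⟩ :=
      foldDirs_spec rows cols c.1 c.2 pvDirs g h S hR hZ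
    rw [show stepCellA rows cols (g, h, S) c.1 c.2 =
      pvDirs.foldl (dirStep rows cols c.1 c.2) (g, h, S) from rfl, hfold1]
    have hR' : RowsOk g' rows cols := rowsOk_of_sameShape hsh1 hR
    have hQ' : ∀ p ∈ Q', p.1 < rows ∧ p.2 < cols ∧ cellAt g' p.1 p.2 = 1 := by
      intro p hp
      obtain ⟨h1, h2, h3⟩ := hQ p (List.mem_cons_of_mem c hp)
      refine ⟨h1, h2, ?_⟩
      rw [hchar1 p.1 p.2]
      by_cases hm : (p.1, p.2) ∈ E₁
      · rw [if_pos hm]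
      · rw [if_neg hm]; exact h3
    obtain ⟨g₁, E₂, hfold2, hsh2, hZ2, hE2, hchar2, hcov2⟩ :=
      ih g' (h - E₁.length) (S ++ E₁) hR' hZ1 hQ'
    refine ⟨g₁, E₁ ++ E₂, ?_, sameShape_trans hsh2 hsh1,
      by simp only [List.length_append]; push_cast at hZ2 ⊢; omega, ?_, ?_, ?_⟩
    · rw [hfold2]
      simp only [Prod.mk.injEq, List.length_append, List.append_assoc]
      refine ⟨by trivial, by push_cast; ring, by trivial⟩
    · intro q hq
      rcases List.mem_append.mp hq with hq | hq
      · obtain ⟨h1, h2, h3, d, hd, he1, he2⟩ := hE1 q hq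
        exact ⟨h1, h2, h3, c, List.mem_cons_self,
          by have := AdjN_of_dir hd c.1 c.2 q.1 q.2 he1 he2; simpa using this⟩
      · obtain ⟨h1, h2, h3, c', hc', hadj⟩ := hE2 q hq
        rw [hchar1 q.1 q.2] at h3
        by_cases hm : (q.1, q.2) ∈ E₁
        · rw [if_pos hm] at h3; exact absurd h3 (by norm_num)
        · rw [if_neg hm] at h3
          exact ⟨h1, h2, h3, c', List.mem_cons_of_mem c hc', hadj⟩
    · intro i j
      rw [hchar2 i j]
      by_cases hm2 : (i, j) ∈ E₂
      · rw [if_pos hm2, if_pos (List.mem_append.mpr (Or.inr hm2))]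
      · rw [if_neg hm2, hchar1 i j]
        by_cases hm1 : (i, j) ∈ E₁
        · rw [if_pos hm1, if_pos (List.mem_append.mpr (Or.inl hm1))]
        · rw [if_neg hm1, if_neg (fun hm => (List.mem_append.mp hm).elim hm1 hm2)]
    · intro c' hc' a b hadj ha hb
      rcases List.mem_cons.mp hc' with hc' | hc'
      · subst hc'
        obtain ⟨d, hd, he1, he2⟩ := dir_of_AdjN (x := c'.1) (y := c'.2) (by simpa using hadj)
        have h0 := hcov1 d hd a b he1 he2 ha hb
        rw [hchar2 a b]
        by_cases hm : (a, b) ∈ E₂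
        · rw [if_pos hm]; norm_num
        · rw [if_neg hm]; exact h0
      · exact hcov2 c' hc' a b hadj ha hb


theorem mem_targetsB (g : List (List Int)) (rows cols i j : Nat) :
    (i, j) ∈ targetsB g rows cols ↔
      i < rows ∧ j < cols ∧ cellAt g i j = 0 ∧
        ∃ a b : Nat, a < rows ∧ b < cols ∧ AdjN (i, j) (a, b) ∧ cellAt g a b = 1 := by
  simp only [targetsB, List.mem_flatMap, List.mem_map, List.mem_filter, List.mem_range,
    isTarget, Bool.and_eq_true, List.any_eq_true, decide_eq_true_eq, Prod.mk.injEq]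
  constructor
  · rintro ⟨i', hi', j', ⟨⟨hj', h0, d, hd, hb, h1⟩, he1, he2⟩⟩
    rw [he1] at h0 hb h1
    rw [he2] at h0 hb h1
    rw [he1] at hi'
    rw [he2] at hj'
    refine ⟨hi', hj', h0, ((i : Int) + d.1).toNat, ((j : Int) + d.2).toNat,
      by omega, by omega, ?_, h1⟩
    exact AdjN_of_dir hd i j _ _ (by omega) (by omega)
  · rintro ⟨hi, hj, h0, a, b, ha, hb, hadj, h1⟩
    obtain ⟨d, hd, he1, he2⟩ := dir_of_AdjN hadj
    refine ⟨i, hi, j, ⟨⟨hj, h0, d, hd, ⟨by omega, ?_⟩⟩, rfl, rfl⟩⟩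
    have h1' : ((i : Int) + d.1).toNat = a := by omega
    have h2' : ((j : Int) + d.2).toNat = b := by omega
    rw [h1', h2']; exact h1

theorem flipB_spec (rows cols : Nat) :
    ∀ (ts : List (Nat × Nat)) (g : List (List Int)), RowsOk g rows cols →
    (∀ p ∈ ts, p.1 < rows ∧ p.2 < cols) →
    SameShape (flipB g ts) g ∧
      ∀ i j : Nat, cellAt (flipB g ts) i j = if (i, j) ∈ ts then 1 else cellAt g i j := by
  intro ts
  induction ts with
  | nil => intro g hR _; exact ⟨sameShape_refl g, by simp [flipB]⟩
  | cons t ts ih =>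
    intro g hR hts
    obtain ⟨ht1, ht2⟩ := hts t List.mem_cons_self
    obtain ⟨hgi, hgj⟩ := rowLen_ge hR ht1 ht2
    have hstep : flipB g (t :: ts) = flipB (setCell g t.1 t.2 1) ts := rfl
    have hR' : RowsOk (setCell g t.1 t.2 1) rows cols :=
      rowsOk_of_sameShape (sameShape_setCell g _ _ 1) hR
    obtain ⟨hsh, hchar⟩ := ih (setCell g t.1 t.2 1) hR'
      (fun p hp => hts p (List.mem_cons_of_mem t hp))
    rw [hstep]
    refine ⟨sameShape_trans hsh (sameShape_setCell g _ _ 1), ?_⟩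
    intro i j
    rw [hchar i j, cellAt_setCell g t.1 t.2 1 hgi hgj i j]
    by_cases hm : (i, j) ∈ ts
    · rw [if_pos hm, if_pos (List.mem_cons_of_mem t hm)]
    · rw [if_neg hm]
      by_cases hp : i = t.1 ∧ j = t.2
      · rw [if_pos hp, if_pos (by simp [hp.1, hp.2])]
      · rw [if_neg hp, if_neg ?_]
        intro hmem
        rcases List.mem_cons.mp hmem with hm' | hm'
        · exact hp ⟨congrArg Prod.fst hm', congrArg Prod.snd hm'⟩
        · exact hm hm'

theorem grid_ext {g₁ g₂ : List (List Int)} (hs : SameShape g₁ g₂)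
    (hc : ∀ i j : Nat, cellAt g₁ i j = cellAt g₂ i j) : g₁ = g₂ := by
  apply List.ext_getElem hs.1
  intro i h1 h2
  apply List.ext_getElem
  · have := hs.2 i
    rwa [getD_getD, getD_getD, List.getElem?_eq_getElem h1, List.getElem?_eq_getElem h2] at this
  · intro j hj1 hj2
    have := hc i j
    unfold cellAt at this
    rw [getD_getD, getD_getD, List.getElem?_eq_getElem h1, List.getElem?_eq_getElem h2] at this
    simp only [Option.getD_some] at this
    rwa [List.getD_eq_getElem?_getD, List.getD_eq_getElem?_getD,
      List.getElem?_eq_getElem hj1, List.getElem?_eq_getElem hj2] at this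

theorem anyZeroB_iff (g : List (List Int)) (rows cols : Nat) :
    anyZeroB g rows cols = true ↔ 0 < (Zf g rows cols).card := by
  rw [Finset.card_pos]
  simp only [anyZeroB, List.any_eq_true, List.mem_range, beq_iff_eq]
  constructor
  · rintro ⟨i, hi, j, hj, h0⟩
    exact ⟨(i, j), by simp [Zf, Finset.mem_filter, Finset.mem_product, Finset.mem_range, hi, hj, h0]⟩
  · rintro ⟨p, hp⟩
    simp only [Zf, Finset.mem_filter, Finset.mem_product, Finset.mem_range] at hp
    exact ⟨p.1, hp.1.1, p.2, hp.1.2, hp.2⟩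

theorem Zf_card_le (g : List (List Int)) (rows cols : Nat) :
    (Zf g rows cols).card ≤ rows * cols := by
  calc (Zf g rows cols).card ≤ (Finset.range rows ×ˢ Finset.range cols).card :=
        Finset.card_filter_le _ _
    _ = rows * cols := by rw [Finset.card_product, Finset.card_range, Finset.card_range]


-- ---- the initial scan ----

theorem countP_range_card (p : Nat → Bool) :
    ∀ n : Nat, (List.range n).countP p = ((Finset.range n).filter (fun j => p j = true)).card := by
  intro n
  induction n with
  | zero => simp
  | succ n ih =>
    rw [List.range_succ, List.countP_append, Finset.range_add_one, Finset.filter_insert]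
    by_cases hp : p n = true
    · rw [if_pos hp, Finset.card_insert_of_notMem (by simp)]
      simp [hp, ih]
    · rw [if_neg hp]
      simp [hp, ih]

theorem Zf_succ_card (g : List (List Int)) (c r : Nat) :
    (Zf g (r + 1) c).card =
      (Zf g r c).card + ((Finset.range c).filter (fun j => cellAt g r j = 0)).card := by
  have hinj : Function.Injective (fun j : Nat => (r, j)) := by
    intro a b hab; simpa using hab
  have hu : Zf g (r + 1) c = Zf g r c ∪
      ((Finset.range c).filter (fun j => cellAt g r j = 0)).map ⟨fun j => (r, j), hinj⟩ := by
    ext p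
    obtain ⟨a, b⟩ := p
    simp only [Zf, Finset.mem_union, Finset.mem_filter, Finset.mem_product, Finset.mem_range,
      Finset.mem_map, Function.Embedding.coeFn_mk, Prod.mk.injEq]
    constructor
    · rintro ⟨⟨ha, hb⟩, h0⟩
      rcases Nat.lt_succ_iff_lt_or_eq.mp ha with h | h
      · exact Or.inl ⟨⟨h, hb⟩, h0⟩
      · subst h
        exact Or.inr ⟨b, ⟨hb, h0⟩, rfl, rfl⟩
    · rintro (⟨⟨ha, hb⟩, h0⟩ | ⟨q, ⟨hq, h0⟩, hr, hb⟩)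
      · exact ⟨⟨Nat.lt_succ_of_lt ha, hb⟩, h0⟩
      · subst hr; subst hb
        exact ⟨⟨Nat.lt_succ_self _, hq⟩, h0⟩
  rw [hu, Finset.card_union_of_disjoint, Finset.card_map]
  rw [Finset.disjoint_left]
  rintro ⟨a, b⟩ hz hm
  simp only [Zf, Finset.mem_filter, Finset.mem_product, Finset.mem_range] at hz
  simp only [Finset.mem_map, Function.Embedding.coeFn_mk, Prod.mk.injEq] at hm
  obtain ⟨q, _, hr, _⟩ := hm
  omega

theorem scan_inner (g : List (List Int)) (i : Nat) :
    ∀ (n : Nat) (st : Int × List (Nat × Nat)),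
    (List.range n).foldl (fun st j =>
        if cellAt g i j = 1 then (st.1, st.2 ++ [(i, j)])
        else if cellAt g i j = 0 then (st.1 + 1, st.2) else st) st =
      (st.1 + ((List.range n).countP (fun j => decide (cellAt g i j = 0)) : Nat),
       st.2 ++ ((List.range n).filter (fun j => decide (cellAt g i j = 1))).map (fun j => (i, j))) := by
  intro n
  induction n with
  | zero => intro st; simp
  | succ n ih =>
    intro st
    rw [List.range_succ, List.foldl_append, ih st, List.countP_append, List.filter_append]
    simp only [List.foldl_cons, List.foldl_nil, List.countP_cons, List.countP_nil,
      List.filter_cons, List.filter_nil]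
    by_cases h1 : cellAt g i n = 1
    · rw [if_pos h1]
      simp [h1]
    · rw [if_neg h1]
      by_cases h0 : cellAt g i n = 0
      · rw [if_pos h0]
        simp only [h0, decide_true]
        simp
        ring
      · rw [if_neg h0]
        simp [h0, h1]

theorem scanA_spec (g : List (List Int)) (rows cols : Nat) :
    scanA g rows cols =
      (((Zf g rows cols).card : Int),
       (List.range rows).flatMap (fun i =>
         ((List.range cols).filter (fun j => decide (cellAt g i j = 1))).map (fun j => (i, j)))) := by
  unfold scanA
  suffices h : ∀ (r : Nat) (st : Int × List (Nat × Nat)),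
      (List.range r).foldl (fun st i =>
        (List.range cols).foldl (fun st j =>
          if cellAt g i j = 1 then (st.1, st.2 ++ [(i, j)])
          else if cellAt g i j = 0 then (st.1 + 1, st.2) else st) st) st =
      (st.1 + ((Zf g r cols).card : Int),
       st.2 ++ (List.range r).flatMap (fun i =>
         ((List.range cols).filter (fun j => decide (cellAt g i j = 1))).map (fun j => (i, j)))) by
    rw [h rows (0, [])]
    simp
  intro r
  induction r with
  | zero =>
    intro st
    simp [Zf]
  | succ r ih =>
    intro st
    rw [List.range_succ, List.foldl_append, ih st]
    simp only [List.foldl_cons, List.foldl_nil]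
    rw [scan_inner g r cols _, List.flatMap_append]
    simp only [List.flatMap_cons, List.flatMap_nil, List.append_nil, List.append_assoc]
    refine Prod.ext ?_ rfl
    dsimp only
    rw [countP_range_card, Zf_succ_card g cols r]
    simp only [decide_eq_true_eq]
    push_cast
    ring


theorem sameShape_symm {g₁ g₂ : List (List Int)} (h : SameShape g₁ g₂) : SameShape g₂ g₁ :=
  ⟨h.1.symm, fun i => (h.2 i).symm⟩

-- the main bisimulation: A's level loop against B's round loop
theorem while_main (rows cols : Nat) :
    ∀ (n : Nat) (g : List (List Int)) (h : Int) (Q : List (Nat × Nat)) (t : Int) (fA fB : Nat),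
    (Zf g rows cols).card + Q.length = n →
    n < fA → (Zf g rows cols).card < fB →
    RowsOk g rows cols → h = ((Zf g rows cols).card : Int) →
    (∀ p ∈ Q, p.1 < rows ∧ p.2 < cols ∧ cellAt g p.1 p.2 = 1) →
    Sat g rows cols Q →
    whileA rows cols fA (g, h, Q) t =
      (if anyZeroB (whileB rows cols fB g t).1 rows cols then -1
       else (whileB rows cols fB g t).2) := by
  intro n
  induction n using Nat.strong_induction_on with
  | _ n IH =>
    intro g h Q t fA fB hn hfA hfB hR hZ hQ hSat
    obtain ⟨fA', rfl⟩ : ∃ fA', fA = fA' + 1 := ⟨fA - 1, by omega⟩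
    obtain ⟨fB', rfl⟩ : ∃ fB', fB = fB' + 1 := ⟨fB - 1, by omega⟩
    by_cases hh : h = 0
    · -- humans are already 0: no window zero cell anywhere
      have hcard : (Zf g rows cols).card = 0 := by omega
      have hts : targetsB g rows cols = [] := by
        rw [List.eq_nil_iff_forall_not_mem]
        rintro ⟨a, b⟩ hp
        obtain ⟨ha, hb, h0, _⟩ := (mem_targetsB g rows cols a b).mp hp
        have : (a, b) ∈ Zf g rows cols := by
          simp [Zf, Finset.mem_filter, Finset.mem_product, Finset.mem_range, ha, hb, h0]
        have := Finset.card_pos.mpr ⟨(a, b), this⟩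
        omega
      have hB : whileB rows cols (fB' + 1) g t = (g, t) := by
        rw [whileB]; simp [hts]
      have hAZ : ¬ (anyZeroB g rows cols = true) := by
        rw [anyZeroB_iff]; omega
      rw [whileA, hB]
      simp only [hh]
      norm_num
      intro hc
      exact absurd hc hAZ
    · have hcard : 0 < (Zf g rows cols).card := by
        rcases Nat.eq_zero_or_pos (Zf g rows cols).card with h0 | h0
        · exact absurd (by rw [hZ, h0]; rfl) hh
        · exact h0
      have hhpos : 0 < h := by omega
      by_cases hQnil : Q = []
      · -- no zombies left but humans remain: both return -1
        have hts : targetsB g rows cols = [] := by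
          rw [List.eq_nil_iff_forall_not_mem]
          rintro ⟨a, b⟩ hp
          obtain ⟨ha, hb, h0, c, d, hc, hd, hadj, h1⟩ := (mem_targetsB g rows cols a b).mp hp
          exact hSat c d hc hd h1 (by simp [hQnil]) a b (AdjN_symm hadj) ha hb h0
        have hB : whileB rows cols (fB' + 1) g t = (g, t) := by
          rw [whileB]; simp [hts]
        have hAZ : anyZeroB g rows cols = true := (anyZeroB_iff g rows cols).mpr hcard
        rw [whileA, hB]
        simp [hQnil, hh, hAZ]
      · -- run one level / one round
        have hQlen : 0 < Q.length := List.length_pos_of_ne_nil hQnil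
        have hlevel := levelA_eq_foldl rows cols Q g h []
        rw [List.append_nil] at hlevel
        obtain ⟨g₁, E, hfold, hsh, hZ₁, hE, hchar, hcov⟩ :=
          foldQ_spec rows cols Q g h [] hR hZ hQ
        rw [List.nil_append] at hfold
        have hR₁ : RowsOk g₁ rows cols := rowsOk_of_sameShape hsh hR
        have hEt : ∀ p : Nat × Nat, p ∈ E ↔ p ∈ targetsB g rows cols := by
          intro p
          constructor
          · intro hp
            obtain ⟨h1, h2, h0, c, hc, hadj⟩ := hE p hp
            obtain ⟨hc1, hc2, hcell⟩ := hQ c hc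
            exact (mem_targetsB g rows cols p.1 p.2).mpr
              ⟨h1, h2, h0, c.1, c.2, hc1, hc2, AdjN_symm hadj, hcell⟩
          · intro hp
            obtain ⟨h1, h2, h0, a, b, ha, hb, hadj, h1c⟩ :=
              (mem_targetsB g rows cols p.1 p.2).mp hp
            by_cases hq : (a, b) ∈ Q
            · have hne := hcov (a, b) hq p.1 p.2 (AdjN_symm hadj) h1 h2
              rw [hchar p.1 p.2] at hne
              by_cases hm : (p.1, p.2) ∈ E
              · simpa using hm
              · rw [if_neg hm] at hne; exact absurd h0 hne
            · exact absurd h0 (hSat a b ha hb h1c hq p.1 p.2 (AdjN_symm hadj) h1 h2)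
        have hA1 : whileA rows cols (fA' + 1) (g, h, Q) t =
            whileA rows cols fA' (g₁, h - E.length, E) (t + 1) := by
          rw [whileA, if_pos ⟨hhpos, hQnil⟩, hlevel, hfold]
        by_cases hts : targetsB g rows cols = []
        · -- a level that infects nobody: queue empties, humans stay positive
          have hE0 : E = [] := by
            rw [List.eq_nil_iff_forall_not_mem]
            intro p hp
            rw [hts] at hEt
            exact (List.not_mem_nil).elim ((hEt p).mp hp)
          have hgeq : g₁ = g := by
            apply grid_ext hsh
            intro i j
            rw [hchar i j, hE0]
            simp
          have hB : whileB rows cols (fB' + 1) g t = (g, t) := by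
            rw [whileB]; simp [hts]
          have hB2 : whileB rows cols (fB' + 1) g (t + 1) = (g, t + 1) := by
            rw [whileB]; simp [hts]
          have hSat' : Sat g rows cols [] := by
            intro i j hi hj h1 _ a b hadj ha hb h0
            exact absurd ((mem_targetsB g rows cols a b).mpr
              ⟨ha, hb, h0, i, j, hi, hj, AdjN_symm hadj, h1⟩) (by rw [hts]; exact List.not_mem_nil)
          have hstep := IH ((Zf g rows cols).card) (by omega) g h [] (t + 1) fA' (fB' + 1)
            (by simp) (by omega) (by omega) hR hZ (by simp) hSat'
          rw [hA1, hE0, hgeq]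
          simp only [List.length_nil, Nat.cast_zero, sub_zero]
          rw [hstep, hB, hB2]
          have hAZ : anyZeroB g rows cols = true := (anyZeroB_iff g rows cols).mpr hcard
          simp [hAZ]
        · -- a productive round
          have hEnil : E ≠ [] := by
            intro hE0
            obtain ⟨p, hp⟩ := List.exists_mem_of_ne_nil _ hts
            rw [hE0] at hEt
            exact (List.not_mem_nil).elim ((hEt p).mpr hp)
          have htwin : ∀ p ∈ targetsB g rows cols, p.1 < rows ∧ p.2 < cols := by
            intro p hp
            obtain ⟨h1, h2, _⟩ := (mem_targetsB g rows cols p.1 p.2).mp hp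
            exact ⟨h1, h2⟩
          obtain ⟨hfsh, hfchar⟩ := flipB_spec rows cols (targetsB g rows cols) g hR htwin
          have hgeq : g₁ = flipB g (targetsB g rows cols) := by
            apply grid_ext (sameShape_trans hsh (sameShape_symm hfsh))
            intro i j
            rw [hchar i j, hfchar i j]
            by_cases hm : (i, j) ∈ E
            · rw [if_pos hm, if_pos ((hEt (i, j)).mp hm)]
            · rw [if_neg hm, if_neg (fun hc => hm ((hEt (i, j)).mpr hc))]
          have hcard₁ : (Zf g₁ rows cols).card + E.length = (Zf g rows cols).card := by
            omega
          have hElen : 0 < E.length := List.length_pos_of_ne_nil hEnil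
          have hE1 : ∀ p ∈ E, p.1 < rows ∧ p.2 < cols ∧ cellAt g₁ p.1 p.2 = 1 := by
            intro p hp
            obtain ⟨h1, h2, _⟩ := hE p hp
            refine ⟨h1, h2, ?_⟩
            rw [hchar p.1 p.2, if_pos (by simpa using hp)]
          have hSat₁ : Sat g₁ rows cols E := by
            intro i j hi hj h1 hmem a b hadj ha hb h0
            have h0g : cellAt g a b = 0 := by
              rw [hchar a b] at h0
              by_cases hm : (a, b) ∈ E
              · rw [if_pos hm] at h0; exact absurd h0 (by norm_num)
              · rwa [if_neg hm] at h0
            have h1g : cellAt g i j = 1 := by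
              rw [hchar i j, if_neg hmem] at h1
              exact h1
            by_cases hq : (i, j) ∈ Q
            · exact absurd h0 (hcov (i, j) hq a b hadj ha hb)
            · exact absurd h0g (hSat i j hi hj h1g hq a b hadj ha hb)
          have hstep := IH ((Zf g₁ rows cols).card + E.length) (by omega) g₁ (h - E.length) E
            (t + 1) fA' fB' rfl (by omega) (by omega) hR₁ hZ₁ hE1 hSat₁
          rw [hA1, hstep]
          have hB : whileB rows cols (fB' + 1) g t =
              whileB rows cols fB' g₁ (t + 1) := by
            rw [whileB]
            simp [hts, ← hgeq]
          rw [hB]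

theorem min_infection_time_spec : Claim_equal_min_infection_time := by
  unfold Claim_equal_min_infection_time Spec_min_infection_time
  intro grid _ hPre
  unfold min_infection_time min_infection_time_alt
  dsimp only
  rw [scanA_spec grid grid.length (grid.getD 0 []).length]
  dsimp only
  have hR : RowsOk grid grid.length (grid.getD 0 []).length := by
    refine ⟨rfl, fun i hi => ?_⟩
    have hmem : grid.getD i [] ∈ grid := by
      rw [getD_getD, List.getElem?_eq_getElem hi]
      exact List.getElem_mem hi
    exact hPre.2 _ hmem
  have hQ0 : ∀ p ∈ (List.range grid.length).flatMap (fun i =>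
      ((List.range (grid.getD 0 []).length).filter
        (fun j => decide (cellAt grid i j = 1))).map (fun j => (i, j))),
      p.1 < grid.length ∧ p.2 < (grid.getD 0 []).length ∧ cellAt grid p.1 p.2 = 1 := by
    intro p hp
    simp only [List.mem_flatMap, List.mem_map, List.mem_filter, List.mem_range,
      decide_eq_true_eq] at hp
    obtain ⟨i, hi, j, ⟨hj, h1⟩, heq⟩ := hp
    rw [← heq]
    exact ⟨hi, hj, h1⟩
  have hSat0 : Sat grid grid.length (grid.getD 0 []).length
      ((List.range grid.length).flatMap (fun i =>
        ((List.range (grid.getD 0 []).length).filter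
          (fun j => decide (cellAt grid i j = 1))).map (fun j => (i, j)))) := by
    intro i j hi hj h1 hmem
    exact absurd (by
      simp only [List.mem_flatMap, List.mem_map, List.mem_filter, List.mem_range,
        decide_eq_true_eq]
      exact ⟨i, hi, j, ⟨hj, h1⟩, rfl⟩) hmem
  rw [Int.toNat_natCast]
  exact while_main grid.length (grid.getD 0 []).length _ grid _ _ 0 _ _ rfl
    (by omega)
    (by have := Zf_card_le grid grid.length (grid.getD 0 []).length; omega)
    hR rfl hQ0 hSat0
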